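-- pv_equiv track=rewrite | github.com/Dec1mo/Vietnamese-Address-Parser | json_parser/json_parser.py | handle_dup_substr
-- ===== SOURCE A (Python) =====
-- def handle_dup_substr(str):
-- 	try:
-- 		for i in range(len(str)//2, -1, -1):
-- 			idx = str[i:].find(str[:i])
-- 			if idx != -1 and idx < 5 and str[i] == ',':
-- 				return str[i+idx:]
-- 		return str
-- 	except IndexError:
-- 		return str
-- ===== SOURCE B (Python) =====
-- def handle_dup_substr(str):
--     # Forward single pass with an accumulator: remember the best (largest) comma
--     # position p <= len//2 whose length-p prefix recurs within 5 chars, checking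
--     # the five offsets by direct slice comparison instead of .find.
--     best = None
--     for p in range(1, len(str) // 2 + 1):
--         if str[p] != ',':
--             continue
--         for k in range(5):
--             if str[p + k: p + k + p] == str[:p]:
--                 best = (p, k)
--                 break
--     if best is not None:
--         p, k = best
--         return str[p + k:]
--     return str
-- ===== Notes on version B (the rewrite author's own statement) =====
-- stated objective: faster
-- what changed: A counts DOWN from len//2 probing every index with an early-return substring .find (which scans the whole suffix); B makes one FORWARD pass keeping the best (largest) qualifying comma position in an accumulator and replaces .find by an explicit check of only the five admissible offsets via slice comparison, so the unbounded substring search and the IndexError guard disappear.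
import Mathlib
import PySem

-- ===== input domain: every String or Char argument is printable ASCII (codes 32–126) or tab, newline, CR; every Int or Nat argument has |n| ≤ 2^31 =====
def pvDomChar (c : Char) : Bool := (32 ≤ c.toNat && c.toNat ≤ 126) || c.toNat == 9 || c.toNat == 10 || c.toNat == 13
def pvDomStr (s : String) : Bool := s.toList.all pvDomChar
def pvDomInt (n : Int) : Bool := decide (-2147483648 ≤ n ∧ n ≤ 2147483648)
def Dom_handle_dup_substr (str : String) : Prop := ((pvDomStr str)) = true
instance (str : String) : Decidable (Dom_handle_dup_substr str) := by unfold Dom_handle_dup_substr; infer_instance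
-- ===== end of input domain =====

-- B replaces A's countdown-with-.find-and-early-return by a single forward pass that keeps the
-- best qualifying comma position in an accumulator and tests only the five admissible offsets by
-- direct slice comparison instead of an unbounded .find; same return value on every input
-- (objective: faster, measured).

-- ===== PORT A =====
-- the 'for i in range(len(str)//2, -1, -1)' loop; a none from str[i] is the caught IndexError,
-- whose handler returns str
def pvAgo (s : List Char) : List Int → List Char
  | [] => s
  | i :: rest =>
    let idx := PySem.Chars.find (PySem.List.slice s (some i) none) (PySem.List.slice s none (some i))
    if idx ≠ -1 ∧ idx < 5 then
      match PySem.List.pyGet? s i with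
      | none => s
      | some c => if c = ',' then PySem.List.slice s (some (i + idx)) none else pvAgo s rest
    else pvAgo s rest

def handle_dup_substr (str : String) : String :=
  String.ofList (pvAgo str.toList
    (PySem.List.pyRange (PySem.Int.floordiv (str.toList.length : Int) 2) (-1) (-1)))

-- ===== PORT B =====
-- inner 'for k in range(5): if str[p+k:p+k+p] == str[:p]: best = (p, k); break'
def pvBfindK (s : List Char) (p : Int) : List Int → Option Int
  | [] => none
  | k :: rest =>
    if PySem.List.slice s (some (p + k)) (some (p + k + p)) = PySem.List.slice s none (some p)
    then some k else pvBfindK s p rest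

-- forward 'for p in range(1, len(str)//2 + 1)' updating the accumulator best; str[p] is always
-- in range here (1 ≤ p ≤ len//2 < len), so pyGetD's default is never used
def pvBscan (s : List Char) (best : Option (Int × Int)) : List Int → Option (Int × Int)
  | [] => best
  | p :: rest =>
    if PySem.List.pyGetD s p ' ' ≠ ',' then pvBscan s best rest
    else match pvBfindK s p (PySem.List.pyRange 0 5 1) with
      | some k => pvBscan s (some (p, k)) rest
      | none => pvBscan s best rest

-- 'if best is not None: return str[p+k:]  else: return str'
def pvBres (s : List Char) : Option (Int × Int) → List Char
  | some (p, k) => PySem.List.slice s (some (p + k)) none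
  | none => s

def handle_dup_substr_alt (str : String) : String :=
  String.ofList (pvBres str.toList
    (pvBscan str.toList none
      (PySem.List.pyRange 1 (PySem.Int.floordiv (str.toList.length : Int) 2 + 1) 1)))

-- ===== PRECONDITION & SPEC =====
def Spec_handle_dup_substr (str : String) (out : String) : Prop := out = handle_dup_substr_alt str
instance (str : String) (out : String) : Decidable (Spec_handle_dup_substr str out) := by unfold Spec_handle_dup_substr; infer_instance

-- ===== CLAIM =====
def Claim_equal_handle_dup_substr : Prop := ∀ (str : String), Dom_handle_dup_substr str → Spec_handle_dup_substr str (handle_dup_substr str)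

-- ===== LEMMAS AND PROOFS =====

theorem pv_chk_iff (s : List Char) (pn kn : Nat) (hp : pn ≤ s.length) :
    (PySem.List.slice s (some ((pn : Int) + (kn : Int))) (some ((pn : Int) + (kn : Int) + (pn : Int)))
      = PySem.List.slice s none (some (pn : Int)))
      ↔ s.take pn <+: s.drop (pn + kn) := by
  rw [PySem.List.slice_to_natCast]
  have h1 : (pn : Int) + (kn : Int) = ((pn + kn : Nat) : Int) := by push_cast; ring
  rw [h1, PySem.List.slice_natCast_add]
  have hlen : (s.take pn).length = pn := by simp [hp]
  constructor
  · intro h; rw [← h]; exact List.take_prefix _ _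
  · intro h
    have := List.prefix_iff_eq_take.mp h
    rw [hlen] at this
    exact this.symm


theorem pv_step_eq (s : List Char) (pn : Nat) (hp : pn ≤ s.length) :
    pvBfindK s (pn : Int) (PySem.List.pyRange 0 5 1) =
      (if PySem.Chars.find (s.drop pn) (s.take pn) ≠ -1 ∧ PySem.Chars.find (s.drop pn) (s.take pn) < 5
       then some (PySem.Chars.find (s.drop pn) (s.take pn)) else none) := by
  have hr : PySem.List.pyRange 0 5 1 = [0, 1, 2, 3, 4] := by decide
  rw [hr]
  have chk : ∀ kn : Nat, (PySem.List.slice s (some ((pn : Int) + (kn : Int))) (some ((pn : Int) + (kn : Int) + (pn : Int)))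
      = PySem.List.slice s none (some (pn : Int)))
      ↔ s.take pn <+: s.drop (pn + kn) := fun kn => pv_chk_iff s pn kn hp
  have c0 := chk 0; have c1 := chk 1; have c2 := chk 2; have c3 := chk 3; have c4 := chk 4
  norm_num at c0 c1 c2 c3 c4
  have hge : -1 ≤ PySem.Chars.find (s.drop pn) (s.take pn) := PySem.Chars.neg_one_le_find _ _
  by_cases hcond : PySem.Chars.find (s.drop pn) (s.take pn) ≠ -1 ∧ PySem.Chars.find (s.drop pn) (s.take pn) < 5
  · have h0 : 0 ≤ PySem.Chars.find (s.drop pn) (s.take pn) := by omega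
    obtain ⟨hocc, hmin⟩ := PySem.Chars.find_spec (s := s.drop pn) (sub := s.take pn) h0
    rw [if_pos hcond]
    obtain ⟨m, hm, hm5⟩ : ∃ m : Nat, PySem.Chars.find (s.drop pn) (s.take pn) = (m : Int) ∧ m < 5 :=
      ⟨(PySem.Chars.find (s.drop pn) (s.take pn)).toNat, (Int.toNat_of_nonneg h0).symm, by omega⟩
    rw [hm] at hocc hmin ⊢
    simp only [Int.toNat_natCast, List.drop_drop] at hocc hmin
    have hmin' : ∀ i : Nat, i < m → ¬ s.take pn <+: s.drop (pn + i) := by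
      intro i hi
      have := hmin i (by omega)
      simpa [List.drop_drop] using this
    have hmin0 : 0 < m → ¬ s.take pn <+: s.drop pn := fun h => by simpa using hmin' 0 h
    interval_cases m <;>
      simp_all [pvBfindK, c0, c1, c2, c3, c4, hmin0, hmin' 1, hmin' 2, hmin' 3]
  · rw [if_neg hcond]
    have hno : ∀ kn : Nat, kn < 5 → ¬ s.take pn <+: s.drop (pn + kn) := by
      intro kn hk5 hk
      by_cases hm : PySem.Chars.find (s.drop pn) (s.take pn) = -1
      · have hin : PySem.Chars.isIn (s.take pn) (s.drop pn) = true :=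
          (PySem.Chars.exists_prefix_drop_iff_isIn _ _).mp ⟨kn, by simpa [List.drop_drop] using hk⟩
        exact (PySem.Chars.find_ne_neg_one_iff _ _).mpr ((PySem.Chars.isIn_iff_infix _ _).mp hin) hm
      · have h0 : 0 ≤ PySem.Chars.find (s.drop pn) (s.take pn) := by omega
        have h5 : 5 ≤ PySem.Chars.find (s.drop pn) (s.take pn) := by
          by_contra hlt
          exact hcond ⟨hm, by omega⟩
        obtain ⟨_, hmin⟩ := PySem.Chars.find_spec (s := s.drop pn) (sub := s.take pn) h0
        have := hmin kn (by omega)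
        exact this (by simpa [List.drop_drop] using hk)
    have hno0 : ¬ s.take pn <+: s.drop pn := by simpa using hno 0 (by omega)
    simp [pvBfindK, c0, c1, c2, c3, c4, hno0, hno 1 (by omega), hno 2 (by omega), hno 3 (by omega), hno 4 (by omega)]

theorem pvBscan_append (s : List Char) (b : Option (Int × Int)) (xs ys : List Int) :
    pvBscan s b (xs ++ ys) = pvBscan s (pvBscan s b xs) ys := by
  induction xs generalizing b with
  | nil => rfl
  | cons x xs ih =>
    simp only [List.cons_append, pvBscan]
    split_ifs with h
    · exact ih b
    · cases pvBfindK s x (PySem.List.pyRange 0 5 1) with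
      | some k => exact ih (some (x, k))
      | none => exact ih b


theorem pvAgo_zero (s : List Char) : pvAgo s [0] = s := by
  cases s with
  | nil => decide
  | cons c rest =>
    simp only [pvAgo]
    rw [show PySem.List.slice (c :: rest) none (some (0:Int)) = [] from by
          rw [PySem.List.slice_to _ (by omega)]; simp]
    rw [PySem.Chars.find_nil]
    rw [if_pos (by norm_num)]
    rw [show PySem.List.pyGet? (c :: rest) 0 = some c from by
          rw [PySem.List.pyGet?_zero]; simp]
    simp only []
    split_ifs with h
    · rw [show ((0:Int) + 0) = 0 from by norm_num, PySem.List.slice_from _ (by omega)]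
      simp
    · rfl


theorem pv_main (s : List Char) (l : List Int)
    (hl : ∀ p ∈ l, 0 ≤ p ∧ p < (s.length : Int)) :
    pvAgo s (l.reverse ++ [0]) = pvBres s (pvBscan s none l) := by
  induction l using List.reverseRecOn with
  | nil => simpa using pvAgo_zero s
  | append_singleton l' p ih =>
    have hp : 0 ≤ p ∧ p < (s.length : Int) := hl p (by simp)
    have hl' : ∀ q ∈ l', 0 ≤ q ∧ q < (s.length : Int) := fun q hq => hl q (by simp [hq])
    have hpn : p = ((p.toNat : Nat) : Int) := (Int.toNat_of_nonneg hp.1).symm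
    have hple : p.toNat ≤ s.length := by omega
    have hget : PySem.List.pyGet? s p = some (s[p.toNat]'(by omega)) :=
      PySem.List.pyGet?_eq_some_getElem s hp.1 hp.2
    have hgetD : PySem.List.pyGetD s p ' ' = s[p.toNat]'(by omega) :=
      PySem.List.pyGetD_eq_getElem s ' ' hp.1 hp.2
    have hsl1 : PySem.List.slice s (some p) none = s.drop p.toNat := PySem.List.slice_from s hp.1
    have hsl2 : PySem.List.slice s none (some p) = s.take p.toNat := PySem.List.slice_to s hp.1
    have hstep := pv_step_eq s p.toNat hple
    rw [List.reverse_append, List.reverse_singleton, List.singleton_append, List.cons_append]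
    rw [pvBscan_append]
    simp only [pvAgo, hsl1, hsl2, hget]
    rw [← hpn] at hstep
    by_cases hcond : PySem.Chars.find (s.drop p.toNat) (s.take p.toNat) ≠ -1 ∧
        PySem.Chars.find (s.drop p.toNat) (s.take p.toNat) < 5
    · rw [if_pos hcond]
      by_cases hc : s[p.toNat]'(by omega) = ','
      · rw [if_pos hc]
        simp only [pvBscan, hgetD, hc, ne_eq, not_true_eq_false, if_false]
        rw [hstep, if_pos hcond]
        rfl
      · rw [if_neg hc]
        simp only [pvBscan, hgetD]
        rw [if_pos (by simpa using hc)]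
        exact ih hl'
    · rw [if_neg hcond]
      by_cases hc : s[p.toNat]'(by omega) = ','
      · simp only [pvBscan, hgetD, hc, ne_eq, not_true_eq_false, if_false]
        rw [hstep, if_neg hcond]
        exact ih hl'
      · simp only [pvBscan, hgetD]
        rw [if_pos (by simpa using hc)]
        exact ih hl'

-- ===== VERDICT =====
theorem handle_dup_substr_spec : Claim_equal_handle_dup_substr := by
  intro str _
  unfold Spec_handle_dup_substr handle_dup_substr handle_dup_substr_alt
  have hf : PySem.Int.floordiv (str.toList.length : Int) 2
      = ((str.toList.length / 2 : Nat) : Int) := by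
    exact_mod_cast PySem.Int.floordiv_natCast str.toList.length 2
  rw [hf, PySem.List.pyRange_neg_one_eq_reverse,
      show ((-1 : Int) + 1) = 0 from by norm_num,
      PySem.List.pyRange_one_cons (by omega),
      show ((0 : Int) + 1) = 1 from by norm_num,
      List.reverse_cons, pv_main]
  intro p hp
  have h1 := (PySem.List.mem_pyRange_one).mp hp
  omega
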